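-- pv_equiv track=rewrite | github.com/somolife/scratch | python/learn-python/src/codebat/array3.py | max_span
-- ===== SOURCE A (Python) =====
-- def max_span(nums):
--     """
--     Consider the leftmost and righmost appearances of some value in an array. We'll say that the "span" is
--     the number of elements between the two inclusive. A single value has a span of 1. Returns the largest span
--     found in the given array. (Efficiency is not a priority.)
--
--     :param nums:
--     :return:
--     """
--     d = dict()
--     for i, v in enumerate(nums):
--         if v not in d:
--             d[v] = (i, i)
--         else:
--             d[v] = (d[v][0], i)
--     m = 1
--     for k, v in d.items():
--         m = max(v[1] - v[0] + 1, m)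
--     return m
-- ===== SOURCE B (Python) =====
-- def max_span(nums):
--     n = len(nums)
--     m = 1
--     for i in range(n):
--         for j in range(i, n):
--             if nums[i] == nums[j]:
--                 m = max(m, j - i + 1)
--     return m
-- ===== Notes on version B (the rewrite author's own statement) =====
-- stated objective: alternative
-- what changed: Replaces A's first/last-occurrence dictionary pass with a dictionary-free brute-force nested index scan that maximises j-i+1 over all matching pairs nums[i]==nums[j].
import Mathlib
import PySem

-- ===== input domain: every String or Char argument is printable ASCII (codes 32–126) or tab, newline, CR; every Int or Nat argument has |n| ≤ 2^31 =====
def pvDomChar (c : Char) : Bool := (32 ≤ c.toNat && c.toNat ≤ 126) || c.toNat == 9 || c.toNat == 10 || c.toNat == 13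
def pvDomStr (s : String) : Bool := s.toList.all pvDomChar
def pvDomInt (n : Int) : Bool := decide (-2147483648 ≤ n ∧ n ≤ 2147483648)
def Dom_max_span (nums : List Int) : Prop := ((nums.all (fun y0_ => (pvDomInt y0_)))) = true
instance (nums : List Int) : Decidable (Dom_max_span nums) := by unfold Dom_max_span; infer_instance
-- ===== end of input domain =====

-- B replaces A's first/last-occurrence dictionary with a dictionary-free brute-force nested
-- index scan maximising j-i+1 over all matching pairs; equal return value on every input.

-- ===== PORT A =====
-- first loop of A: build the dict v ↦ (first index, last index)
def pvDictA (nums : List Int) : PySem.Dict Int (Int × Int) :=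
  (PySem.List.enumerate nums 0).foldl
    (fun d p =>
      if d.contains p.2 = false then d.insert p.2 (p.1, p.1)
      else d.insert p.2 ((d.getD p.2 (0, 0)).1, p.1))
    PySem.Dict.empty

def max_span (nums : List Int) : Int :=
  (pvDictA nums).items.foldl (fun m p => max (p.2.2 - p.2.1 + 1) m) 1

-- ===== PORT B =====
def max_span_alt (nums : List Int) : Int :=
  (PySem.List.pyRange 0 (nums.length : Int) 1).foldl
    (fun m i =>
      (PySem.List.pyRange i (nums.length : Int) 1).foldl
        (fun m j =>
          if PySem.List.pyGetD nums i 0 == PySem.List.pyGetD nums j 0 then max m (j - i + 1)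
          else m)
        m)
    1

-- ===== PRECONDITION & SPEC =====
def Spec_max_span (nums : List Int) (out : Int) : Prop := out = max_span_alt nums
instance (nums : List Int) (out : Int) : Decidable (Spec_max_span nums out) := by unfold Spec_max_span; infer_instance

-- ===== CLAIM (what is proved, stated in full; the proofs are below) =====
def Claim_equal_max_span : Prop := ∀ (nums : List Int), Dom_max_span nums → Spec_max_span nums (max_span nums)

-- ===== LEMMAS AND PROOFS =====

-- occurrence indices of value v in an enumerated list
def pvOcc (l : List (Int × Int)) (v : Int) : List Int :=
  (l.filter (fun p => p.2 == v)).map (·.1)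

def pvFirst (nums : List Int) (v : Int) : Int := (pvOcc (PySem.List.enumerate nums 0) v).headD 0
def pvLast (nums : List Int) (v : Int) : Int := (pvOcc (PySem.List.enumerate nums 0) v).getLastD 0

-- value written by A's first-loop body
def pvStepV (d : PySem.Dict Int (Int × Int)) (p : Int × Int) : Int × Int :=
  if d.contains p.2 = false then (p.1, p.1) else ((d.getD p.2 (0, 0)).1, p.1)

lemma pvStepA_eq :
    (fun (d : PySem.Dict Int (Int × Int)) (p : Int × Int) =>
      if d.contains p.2 = false then d.insert p.2 (p.1, p.1)
      else d.insert p.2 ((d.getD p.2 (0, 0)).1, p.1))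
    = fun d p => d.insert p.2 (pvStepV d p) := by
  funext d p
  unfold pvStepV
  split <;> rfl

lemma pvOcc_cons (p : Int × Int) (t : List (Int × Int)) (v : Int) :
    pvOcc (p :: t) v = if p.2 == v then p.1 :: pvOcc t v else pvOcc t v := by
  unfold pvOcc
  rw [List.filter_cons]
  split <;> simp

-- getLastD facts
lemma pvGetLastD_cons_mem : ∀ (t : List Int) (a d : Int), (a :: t).getLastD d ∈ a :: t := by
  intro t
  induction t with
  | nil => intro a d; simp
  | cons b t' ih =>
    intro a d
    rw [List.getLastD_cons]
    exact List.mem_cons_of_mem a (ih b a)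

lemma pvGetLastD_mem {l : List Int} (h : l ≠ []) (d : Int) : l.getLastD d ∈ l := by
  cases l with
  | nil => cases h rfl
  | cons a t => exact pvGetLastD_cons_mem t a d

lemma pvGetLastD_indep {l : List Int} (h : l ≠ []) (d d' : Int) :
    l.getLastD d = l.getLastD d' := by
  cases l with
  | nil => cases h rfl
  | cons a t => rw [List.getLastD_cons, List.getLastD_cons]

lemma pvHeadD_mem {l : List Int} (h : l ≠ []) (d : Int) : l.headD d ∈ l := by
  cases l with
  | nil => exact absurd rfl h
  | cons a t => simp

lemma pvHeadD_le {l : List Int} (hp : l.Pairwise (· < ·)) {x : Int} (hx : x ∈ l) (d : Int) :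
    l.headD d ≤ x := by
  cases l with
  | nil => cases hx
  | cons a t =>
    rcases List.mem_cons.mp hx with rfl | hmem
    · simp
    · simpa using le_of_lt ((List.pairwise_cons.mp hp).1 x hmem)

lemma pvLe_getLastD : ∀ (l : List Int), l.Pairwise (· < ·) →
    ∀ {x : Int}, x ∈ l → ∀ (d : Int), x ≤ l.getLastD d := by
  intro l
  induction l with
  | nil => intro _ x hx; cases hx
  | cons a t ih =>
    intro hp x hx d
    rw [List.getLastD_cons]
    rcases List.mem_cons.mp hx with rfl | hmem
    · cases t with
      | nil => simp
      | cons b t' =>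
        exact le_of_lt ((List.pairwise_cons.mp hp).1 _ (pvGetLastD_cons_mem t' b x))
    · exact ih (List.pairwise_cons.mp hp).2 hmem a

-- generic foldl lemmas for "running maximum"-shaped loops
lemma pvFoldl_le_init {α : Type} (F : Int → α → Int) (hp : ∀ m x, m ≤ F m x) :
    ∀ (l : List α) (c : Int), c ≤ l.foldl F c := by
  intro l
  induction l with
  | nil => intro c; simp
  | cons a t ih => intro c; exact le_trans (hp c a) (ih (F c a))

lemma pvFoldl_ge_mem {α : Type} (F : Int → α → Int) (hp : ∀ m x, m ≤ F m x)
    {l : List α} {x : α} (hx : x ∈ l) {t : Int} (ht : ∀ m, t ≤ F m x) :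
    ∀ (c : Int), t ≤ l.foldl F c := by
  induction l with
  | nil => cases hx
  | cons a r ih =>
    intro c
    rcases List.mem_cons.mp hx with rfl | hmem
    · exact le_trans (ht c) (pvFoldl_le_init F hp r (F c x))
    · exact ih hmem (F c a)

lemma pvFoldl_le_bound {α : Type} (F : Int → α → Int) {M : Int} {l : List α}
    (h : ∀ m, m ≤ M → ∀ x ∈ l, F m x ≤ M) :
    ∀ (c : Int), c ≤ M → l.foldl F c ≤ M := by
  induction l with
  | nil => intro c hc; simpa using hc
  | cons a t ih =>
    intro c hc
    exact ih (fun m hm x hx => h m hm x (List.mem_cons_of_mem a hx)) (F c a)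
      (h c hc a List.mem_cons_self)

-- characterization of A's dict after processing l, starting from any d
lemma pvFoldGet (l : List (Int × Int)) (d : PySem.Dict Int (Int × Int)) (v : Int) :
    ((l.foldl (fun d p => d.insert p.2 (pvStepV d p)) d).get? v) =
      if pvOcc l v = [] then d.get? v
      else some ((d.get? v).elim ((pvOcc l v).headD 0) Prod.fst, (pvOcc l v).getLastD 0) := by
  induction l generalizing d with
  | nil => simp [pvOcc]
  | cons p t ih =>
    rw [List.foldl_cons, ih, pvOcc_cons]
    by_cases hv : p.2 = v
    · subst hv
      simp only [beq_self_eq_true, if_true]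
      by_cases hc : d.contains p.2 = false
      · have hget : d.get? p.2 = none := (PySem.Dict.get?_eq_none_iff_contains d p.2).mpr hc
        have hstep : pvStepV d p = (p.1, p.1) := by unfold pvStepV; rw [if_pos hc]
        rw [hstep, PySem.Dict.get?_insert_self, hget]
        by_cases ht : pvOcc t p.2 = []
        · simp [ht]
        · rw [if_neg ht, if_neg (List.cons_ne_nil _ _), List.getLastD_cons,
            pvGetLastD_indep ht p.1 0]
          simp
      · rw [Bool.not_eq_false] at hc
        obtain ⟨w, hw⟩ : ∃ w, d.get? p.2 = some w := by
          have h1 := PySem.Dict.contains_eq_isSome_get? d p.2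
          rw [hc] at h1
          exact Option.isSome_iff_exists.mp h1.symm
        have hstep : pvStepV d p = (w.1, p.1) := by
          unfold pvStepV
          rw [if_neg (by simp [hc]), PySem.Dict.getD_of_get?_eq_some d (0, 0) hw]
        rw [hstep, PySem.Dict.get?_insert_self, hw]
        by_cases ht : pvOcc t p.2 = []
        · simp [ht]
        · rw [if_neg ht, if_neg (List.cons_ne_nil _ _), List.getLastD_cons,
            pvGetLastD_indep ht p.1 0]
          simp
    · have hb : (p.2 == v) = false := beq_eq_false_iff_ne.mpr hv
      have hins : (d.insert p.2 (pvStepV d p)).get? v = d.get? v :=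
        PySem.Dict.get?_insert_of_ne d (pvStepV d p) (Ne.symm hv)
      simp only [hb, Bool.false_eq_true, if_false, hins]

-- membership in the occurrence list of the full enumeration
lemma pvMem_occ (nums : List Int) (v x : Int) :
    x ∈ pvOcc (PySem.List.enumerate nums 0) v ↔
      0 ≤ x ∧ x < (nums.length : Int) ∧ PySem.List.pyGetD nums x 0 = v := by
  unfold pvOcc
  simp only [List.mem_map, List.mem_filter, PySem.List.mem_enumerate_iff]
  constructor
  · rintro ⟨p, ⟨⟨k, hk, rfl⟩, hbeq⟩, rfl⟩
    have hx : ((0 : Int) + k, nums[k]).1 = (k : Int) := by simp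
    rw [hx]
    refine ⟨Int.natCast_nonneg k, by exact_mod_cast hk, ?_⟩
    rw [PySem.List.pyGetD_natCast, List.getD_eq_getElem nums 0 hk]
    simpa using hbeq
  · rintro ⟨hx0, hxn, hget⟩
    have hk : x.toNat < nums.length := by omega
    have h2 : PySem.List.pyGetD nums x 0 = nums[x.toNat] := by
      rw [PySem.List.pyGetD_of_nonneg nums 0 hx0, List.getD_eq_getElem nums 0 hk]
    have h3 : nums[x.toNat] = v := by rw [← h2]; exact hget
    refine ⟨((0 : Int) + x.toNat, nums[x.toNat]), ⟨⟨x.toNat, hk, rfl⟩, ?_⟩, by simp; omega⟩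
    simp only [beq_iff_eq]
    exact h3

lemma pvOcc_pairwise (nums : List Int) (v : Int) :
    (pvOcc (PySem.List.enumerate nums 0) v).Pairwise (· < ·) := by
  unfold pvOcc
  exact (List.Pairwise.filter _ (PySem.List.pairwise_lt_enumerate nums 0)).map _
    (fun _ _ h => h)

lemma pvOcc_ne_nil (nums : List Int) {v : Int} (hv : v ∈ nums) :
    pvOcc (PySem.List.enumerate nums 0) v ≠ [] := by
  obtain ⟨t, ht, rfl⟩ := List.getElem_of_mem hv
  apply List.ne_nil_of_mem (a := (t : Int))
  rw [pvMem_occ]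
  refine ⟨Int.natCast_nonneg t, by exact_mod_cast ht, ?_⟩
  rw [PySem.List.pyGetD_natCast, List.getD_eq_getElem nums 0 ht]

-- the dict's keys and lookups
lemma pvDictA_keys (nums : List Int) : (pvDictA nums).keys = PySem.Set.ofList nums := by
  unfold pvDictA
  rw [pvStepA_eq, PySem.Dict.keys_foldl_insert_key (key := Prod.snd) (f := pvStepV),
    PySem.Dict.keys_empty, PySem.List.map_snd_enumerate, PySem.Set.update_nil_left]

lemma pvDictA_getD (nums : List Int) {v : Int} (hv : v ∈ nums) :
    (pvDictA nums).getD v (0, 0) = (pvFirst nums v, pvLast nums v) := by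
  have hget : (pvDictA nums).get? v = some (pvFirst nums v, pvLast nums v) := by
    unfold pvDictA
    rw [pvStepA_eq, pvFoldGet, if_neg (pvOcc_ne_nil nums hv), PySem.Dict.get?_empty]
    rfl
  exact PySem.Dict.getD_of_get?_eq_some _ (0, 0) hget

-- A as a running max over the distinct values
lemma pvA_eq (nums : List Int) :
    max_span nums =
      (PySem.Set.ofList nums).foldl
        (fun m k => max (pvLast nums k - pvFirst nums k + 1) m) 1 := by
  have hnd : (pvDictA nums).keys.Nodup := by
    unfold pvDictA
    rw [pvStepA_eq]
    exact PySem.Dict.nodup_keys_foldl_insert_key _ Prod.snd _ _ PySem.Dict.nodup_keys_empty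
  unfold max_span
  rw [PySem.Dict.items_eq_map_keys (pvDictA nums) hnd (0, 0), List.foldl_map, pvDictA_keys]
  refine PySem.List.foldl_congr_mem _ _ _ _ (fun m k hk => ?_)
  rw [pvDictA_getD nums ((PySem.Set.mem_ofList nums k).mp hk)]

-- ===== VERDICT (by name: the statement is the Claim_ definition above) =====
theorem max_span_spec : Claim_equal_max_span := by
  intro nums _
  unfold Spec_max_span
  rw [pvA_eq]
  set n : Int := (nums.length : Int) with hn
  set inner : Int → Int → Int := fun i m =>
    (PySem.List.pyRange i n 1).foldl
      (fun m j =>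
        if PySem.List.pyGetD nums i 0 == PySem.List.pyGetD nums j 0 then max m (j - i + 1)
        else m) m with hinner
  have hinner_prog : ∀ (i : Int) (m : Int) (j : Int), m ≤
      (if PySem.List.pyGetD nums i 0 == PySem.List.pyGetD nums j 0 then max m (j - i + 1)
       else m) := by
    intro i m j; split
    · exact le_max_left _ _
    · exact le_refl m
  have houter_prog : ∀ m i, m ≤ inner i m := by
    intro m i
    exact pvFoldl_le_init _ (hinner_prog i) _ m
  have hB : max_span_alt nums = (PySem.List.pyRange 0 n 1).foldl (fun m i => inner i m) 1 := rfl
  have hA_prog : ∀ (m k : Int), m ≤ max (pvLast nums k - pvFirst nums k + 1) m :=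
    fun m k => le_max_right _ _
  rw [hB]
  apply le_antisymm
  -- A ≤ B: the span of each value k is realised by the pair (first k, last k) in B's scan
  · apply pvFoldl_le_bound
    · intro m hm k hk
      apply max_le _ hm
      have hkmem : k ∈ nums := (PySem.Set.mem_ofList nums k).mp hk
      have hne := pvOcc_ne_nil nums hkmem
      have hi0 := (pvMem_occ nums k (pvFirst nums k)).mp (pvHeadD_mem hne 0)
      have hj0 := (pvMem_occ nums k (pvLast nums k)).mp (pvGetLastD_mem hne 0)
      have hij : pvFirst nums k ≤ pvLast nums k :=
        pvHeadD_le (pvOcc_pairwise nums k) (pvGetLastD_mem hne 0) 0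
      apply pvFoldl_ge_mem _ houter_prog
        (x := pvFirst nums k)
        (by rw [PySem.List.mem_pyRange_one]; exact ⟨hi0.1, hi0.2.1⟩)
      intro m'
      apply pvFoldl_ge_mem _ (hinner_prog (pvFirst nums k))
        (x := pvLast nums k)
        (by rw [PySem.List.mem_pyRange_one]; exact ⟨hij, hj0.2.1⟩)
      intro m''
      rw [if_pos (show (PySem.List.pyGetD nums (pvFirst nums k) 0 ==
            PySem.List.pyGetD nums (pvLast nums k) 0) = true by
          rw [hi0.2.2, hj0.2.2]; exact beq_self_eq_true k)]
      exact le_max_right _ _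
    · exact pvFoldl_le_init _ houter_prog _ 1
  -- B ≤ A: every matching pair (i, j) is dominated by the span of the value nums[i]
  · apply pvFoldl_le_bound
    · intro m hm i hiR
      obtain ⟨hi1, hi2⟩ := PySem.List.mem_pyRange_one.mp hiR
      apply pvFoldl_le_bound _ _ m hm
      intro m' hm' j hjR
      obtain ⟨hj1, hj2⟩ := PySem.List.mem_pyRange_one.mp hjR
      split
      case isTrue hbeq =>
        apply max_le hm'
        set k := PySem.List.pyGetD nums i 0 with hk
        have hiocc : i ∈ pvOcc (PySem.List.enumerate nums 0) k :=
          (pvMem_occ nums k i).mpr ⟨hi1, hi2, rfl⟩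
        have hjocc : j ∈ pvOcc (PySem.List.enumerate nums 0) k :=
          (pvMem_occ nums k j).mpr ⟨le_trans hi1 hj1, hj2, (eq_of_beq hbeq).symm⟩
        have h1 : pvFirst nums k ≤ i := pvHeadD_le (pvOcc_pairwise nums k) hiocc 0
        have h2 : j ≤ pvLast nums k := pvLe_getLastD _ (pvOcc_pairwise nums k) hjocc 0
        have hkmem : k ∈ nums := by
          have hin : i < (nums.length : Int) := hi2
          have hkn : i.toNat < nums.length := by omega
          rw [hk, PySem.List.pyGetD_of_nonneg nums 0 hi1, List.getD_eq_getElem nums 0 hkn]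
          exact List.getElem_mem hkn
        calc j - i + 1 ≤ pvLast nums k - pvFirst nums k + 1 := by omega
          _ ≤ _ := pvFoldl_ge_mem _ hA_prog ((PySem.Set.mem_ofList nums k).mpr hkmem)
                (fun m => le_max_left _ _) 1
      case isFalse => exact hm'
    · exact pvFoldl_le_init _ hA_prog _ 1
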